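-- pv_equiv track=rewrite | github.com/parthalon025/ha-aria | aria/modules/organic_discovery/feature_vectors.py | _collect_categorical_values
-- ===== SOURCE A (Python) =====
-- from typing import Any
--
-- def _resolve_area(
--     entity: dict[str, Any],
--     devices: dict[str, dict[str, Any]],
-- ) -> str | None:
--     """Resolve area_id: entity direct > device fallback."""
--     area = entity.get("area_id")
--     if area:
--         return area
--     device_id = entity.get("device_id")
--     if device_id and device_id in devices:
--         return devices[device_id].get("area_id")
--     return None
--
-- def _resolve_manufacturer(
--     entity: dict[str, Any],
--     devices: dict[str, dict[str, Any]],
-- ) -> str | None: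
--     """Resolve manufacturer from device registry."""
--     device_id = entity.get("device_id")
--     if device_id and device_id in devices:
--         return devices[device_id].get("manufacturer")
--     return None
--
-- def _collect_categorical_values(
--     entities: list[dict[str, Any]],
--     devices: dict[str, dict[str, Any]],
-- ) -> tuple[list[str], list[str], list[str], list[str], list[str]]:
--     """Pre-scan entities to collect all unique categorical values.
--
--     Returns sorted lists of unique: domains, device_classes, units, areas, manufacturers.
--     """
--     domains: set[str] = set()
--     device_classes: set[str] = set()
--     units: set[str] = set()
--     areas: set[str] = set()
--     manufacturers: set[str] = set()
--
--     for entity in entities: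
--         domain = entity.get("domain", "")
--         if domain:
--             domains.add(domain)
--
--         dc = entity.get("device_class")
--         if dc:
--             device_classes.add(dc)
--
--         uom = entity.get("unit_of_measurement")
--         if uom:
--             units.add(uom)
--
--         area = _resolve_area(entity, devices)
--         if area:
--             areas.add(area)
--
--         mfr = _resolve_manufacturer(entity, devices)
--         if mfr:
--             manufacturers.add(mfr)
--
--     return (
--         sorted(domains),
--         sorted(device_classes),
--         sorted(units),
--         sorted(areas),
--         sorted(manufacturers),
--     )
-- ===== SOURCE B (Python) =====
-- def _collect_categorical_values(entities, devices):
--     """No hash sets: each field's raw (duplicate-containing) truthy value stream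
--     is sorted, and duplicates are removed in one adjacent-comparison scan."""
--
--     def _uniq_sorted(vals):
--         out = []
--         for v in sorted(v for v in vals if v):
--             if not out or out[-1] != v:
--                 out.append(v)
--         return out
--
--     def _device(e):
--         d = e.get("device_id")
--         return devices.get(d, {}) if d else {}
--
--     return (
--         _uniq_sorted(e.get("domain", "") for e in entities),
--         _uniq_sorted(e.get("device_class") for e in entities),
--         _uniq_sorted(e.get("unit_of_measurement") for e in entities),
--         _uniq_sorted(e.get("area_id") or _device(e).get("area_id") for e in entities),
--         _uniq_sorted(_device(e).get("manufacturer") for e in entities),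
--     )
-- ===== Notes on version B (the rewrite author's own statement) =====
-- stated objective: alternative
-- what changed: Replaced A's hash-set deduplication (a fused loop maintaining five sets, then sorting each set) by a sort-then-scan algorithm: each field's raw duplicate-containing truthy value stream is sorted and duplicates are dropped in a single adjacent-comparison pass, with the device fallback folded into an or-expression.
import Mathlib
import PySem

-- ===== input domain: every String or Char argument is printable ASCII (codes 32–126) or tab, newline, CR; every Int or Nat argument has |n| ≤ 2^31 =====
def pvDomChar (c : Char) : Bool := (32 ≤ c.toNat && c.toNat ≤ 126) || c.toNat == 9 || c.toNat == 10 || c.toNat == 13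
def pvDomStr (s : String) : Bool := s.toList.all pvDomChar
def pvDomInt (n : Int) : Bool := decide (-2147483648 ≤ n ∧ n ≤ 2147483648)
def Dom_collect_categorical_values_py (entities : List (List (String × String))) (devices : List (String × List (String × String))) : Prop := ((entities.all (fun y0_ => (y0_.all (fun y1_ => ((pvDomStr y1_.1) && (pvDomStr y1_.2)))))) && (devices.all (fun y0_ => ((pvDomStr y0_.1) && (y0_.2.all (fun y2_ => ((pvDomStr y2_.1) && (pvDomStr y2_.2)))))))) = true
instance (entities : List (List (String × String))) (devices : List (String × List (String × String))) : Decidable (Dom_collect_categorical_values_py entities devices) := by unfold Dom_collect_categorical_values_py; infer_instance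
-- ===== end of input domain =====

-- B replaces A's hash-set deduplication (one fused loop maintaining five sets,
-- then sorting each) by sort-then-scan: each field's raw duplicate-containing
-- truthy value stream is sorted and duplicates are dropped in one
-- adjacent-comparison pass; objective: alternative (same asymptotic cost).

-- ===== PORT A =====

-- entity.get(k) on an entity dict
def pvGet (d : List (String × String)) (k : String) : Option String :=
  (PySem.Dict.mk d).get? k

-- Python truthiness of a str|None value
def pvTruthy (o : Option String) : Bool :=
  match o with
  | some s => s ≠ ""
  | none => false

-- _resolve_area
def resolve_area_py (entity : List (String × String)) (devices : List (String × List (String × String))) : Option String :=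
  let area := pvGet entity "area_id"
  if pvTruthy area then area
  else
    match pvGet entity "device_id" with
    | some d =>
        if d ≠ "" then
          match (PySem.Dict.mk devices).get? d with
          | some dev => pvGet dev "area_id"
          | none => none
        else none
    | none => none

-- _resolve_manufacturer
def resolve_manufacturer_py (entity : List (String × String)) (devices : List (String × List (String × String))) : Option String :=
  match pvGet entity "device_id" with
  | some d =>
      if d ≠ "" then
        match (PySem.Dict.mk devices).get? d with
        | some dev => pvGet dev "manufacturer"
        | none => none
      else none
  | none => none

-- the body of A's single for-loop: update all five sets for one entity
def pvStepA (devices : List (String × List (String × String)))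
    (acc : PySem.Set String × PySem.Set String × PySem.Set String × PySem.Set String × PySem.Set String)
    (entity : List (String × String)) :
    PySem.Set String × PySem.Set String × PySem.Set String × PySem.Set String × PySem.Set String :=
  let domain := (PySem.Dict.mk entity).getD "domain" ""
  let domains := if domain ≠ "" then PySem.Set.add acc.1 domain else acc.1
  let device_classes :=
    match pvGet entity "device_class" with
    | some dc => if dc ≠ "" then PySem.Set.add acc.2.1 dc else acc.2.1
    | none => acc.2.1
  let units :=
    match pvGet entity "unit_of_measurement" with
    | some u => if u ≠ "" then PySem.Set.add acc.2.2.1 u else acc.2.2.1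
    | none => acc.2.2.1
  let areas :=
    match resolve_area_py entity devices with
    | some a => if a ≠ "" then PySem.Set.add acc.2.2.2.1 a else acc.2.2.2.1
    | none => acc.2.2.2.1
  let manufacturers :=
    match resolve_manufacturer_py entity devices with
    | some m => if m ≠ "" then PySem.Set.add acc.2.2.2.2 m else acc.2.2.2.2
    | none => acc.2.2.2.2
  (domains, device_classes, units, areas, manufacturers)

def collect_categorical_values_py (entities : List (List (String × String))) (devices : List (String × List (String × String))) : List String × List String × List String × List String × List String :=
  let s := entities.foldl (pvStepA devices) (PySem.Set.empty, PySem.Set.empty, PySem.Set.empty, PySem.Set.empty, PySem.Set.empty)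
  (PySem.List.sorted s.1 (fun x => x) false,
   PySem.List.sorted s.2.1 (fun x => x) false,
   PySem.List.sorted s.2.2.1 (fun x => x) false,
   PySem.List.sorted s.2.2.2.1 (fun x => x) false,
   PySem.List.sorted s.2.2.2.2 (fun x => x) false)

-- ===== PORT B =====

-- 'v for v in vals if v' truthiness filter of B's generator
def pvKeep (o : Option String) : Option String :=
  match o with
  | some v => if v ≠ "" then some v else none
  | none => none

-- B's _uniq_sorted: sort the truthy values (duplicates included), then the
-- adjacent-comparison scan 'if not out or out[-1] != v: out.append(v)'
def pvUniqSorted (vals : List (Option String)) : List String :=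
  (PySem.List.sorted (vals.filterMap pvKeep) (fun x => x) false).foldl
    (fun out v => if out.getLast? = some v then out else out ++ [v]) []

-- B's helper: _device(entity) = devices.get(device_id, {}) if device_id else {}
def pvDevice (devices : List (String × List (String × String))) (entity : List (String × String)) : List (String × String) :=
  match pvGet entity "device_id" with
  | some d => if d ≠ "" then ((PySem.Dict.mk devices).get? d).getD [] else []
  | none => []

-- Python 'x or y' on str|None values
def pvOrOpt (a b : Option String) : Option String :=
  if pvTruthy a then a else b

def collect_categorical_values_py_alt (entities : List (List (String × String))) (devices : List (String × List (String × String))) : List String × List String × List String × List String × List String :=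
  (pvUniqSorted (entities.map (fun e => some ((PySem.Dict.mk e).getD "domain" ""))),
   pvUniqSorted (entities.map (fun e => pvGet e "device_class")),
   pvUniqSorted (entities.map (fun e => pvGet e "unit_of_measurement")),
   pvUniqSorted (entities.map (fun e => pvOrOpt (pvGet e "area_id") (pvGet (pvDevice devices e) "area_id"))),
   pvUniqSorted (entities.map (fun e => pvGet (pvDevice devices e) "manufacturer")))

-- ===== PRECONDITION & SPEC =====
def Spec_collect_categorical_values_py (entities : List (List (String × String))) (devices : List (String × List (String × String))) (out : List String × List String × List String × List String × List String) : Prop := out = collect_categorical_values_py_alt entities devices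
instance (entities : List (List (String × String))) (devices : List (String × List (String × String))) (out : List String × List String × List String × List String × List String) : Decidable (Spec_collect_categorical_values_py entities devices out) := by unfold Spec_collect_categorical_values_py; infer_instance

-- ===== CLAIM (what is proved, stated in full; the proofs are below) =====
def Claim_equal_collect_categorical_values_py : Prop := ∀ (entities : List (List (String × String))) (devices : List (String × List (String × String))), Dom_collect_categorical_values_py entities devices → Spec_collect_categorical_values_py entities devices (collect_categorical_values_py entities devices)

-- ===== LEMMAS AND PROOFS =====

-- one A-side conditional set insertion
def pvCondAdd (s : PySem.Set String) (o : Option String) : PySem.Set String :=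
  match o with
  | some v => if v ≠ "" then PySem.Set.add s v else s
  | none => s

theorem pvStepA_eq (devices : List (String × List (String × String)))
    (acc : PySem.Set String × PySem.Set String × PySem.Set String × PySem.Set String × PySem.Set String)
    (entity : List (String × String)) :
    pvStepA devices acc entity =
      (pvCondAdd acc.1 (some ((PySem.Dict.mk entity).getD "domain" "")),
       pvCondAdd acc.2.1 (pvGet entity "device_class"),
       pvCondAdd acc.2.2.1 (pvGet entity "unit_of_measurement"),
       pvCondAdd acc.2.2.2.1 (resolve_area_py entity devices),
       pvCondAdd acc.2.2.2.2 (resolve_manufacturer_py entity devices)) := by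
  simp only [pvStepA, pvCondAdd]

theorem pvFold_split (devices : List (String × List (String × String)))
    (l : List (List (String × String)))
    (a b c d e : PySem.Set String) :
    l.foldl (pvStepA devices) (a, b, c, d, e) =
      (l.foldl (fun s x => pvCondAdd s (some ((PySem.Dict.mk x).getD "domain" ""))) a,
       l.foldl (fun s x => pvCondAdd s (pvGet x "device_class")) b,
       l.foldl (fun s x => pvCondAdd s (pvGet x "unit_of_measurement")) c,
       l.foldl (fun s x => pvCondAdd s (resolve_area_py x devices)) d,
       l.foldl (fun s x => pvCondAdd s (resolve_manufacturer_py x devices)) e) := by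
  induction l generalizing a b c d e with
  | nil => rfl
  | cons x xs ih => simp only [List.foldl_cons, pvStepA_eq, ih]

theorem pvMem_foldCondAdd {α : Type} (f : α → Option String) (l : List α)
    (s₀ : PySem.Set String) (v : String) :
    v ∈ l.foldl (fun s x => pvCondAdd s (f x)) s₀ ↔
      v ∈ s₀ ∨ ∃ x ∈ l, f x = some v ∧ v ≠ "" := by
  induction l generalizing s₀ with
  | nil => simp
  | cons y ys ih =>
    simp only [List.foldl_cons, ih, List.mem_cons]
    constructor
    · rintro (h | h)
      · cases hf : f y with
        | none => simp [pvCondAdd, hf] at h; exact Or.inl h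
        | some w =>
          simp only [pvCondAdd, hf] at h
          by_cases hw : w ≠ ""
          · simp only [if_pos hw, PySem.Set.mem_add] at h
            rcases h with h | rfl
            · exact Or.inl h
            · exact Or.inr ⟨y, Or.inl rfl, hf, hw⟩
          · simp only [if_neg hw] at h; exact Or.inl h
      · rcases h with ⟨x, hx, hfx, hv⟩
        exact Or.inr ⟨x, Or.inr hx, hfx, hv⟩
    · rintro (h | ⟨x, hx | hx, hfx, hv⟩)
      · left
        cases hf : f y with
        | none => simpa [pvCondAdd, hf] using h
        | some w =>
          simp only [pvCondAdd]
          split_ifs with hw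
          · exact (PySem.Set.mem_add _ _ _).mpr (Or.inl h)
          · exact h
      · subst hx
        left
        rw [hfx]
        simp only [pvCondAdd, if_pos hv]
        exact (PySem.Set.mem_add _ _ _).mpr (Or.inr rfl)
      · exact Or.inr ⟨x, hx, hfx, hv⟩

theorem pvNodup_foldCondAdd {α : Type} (f : α → Option String) (l : List α)
    (s₀ : PySem.Set String) (h : s₀.Nodup) :
    (l.foldl (fun s x => pvCondAdd s (f x)) s₀).Nodup := by
  induction l generalizing s₀ with
  | nil => exact h
  | cons y ys ih =>
    refine ih _ ?_
    cases hf : f y with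
    | none => simpa [pvCondAdd, hf] using h
    | some w =>
      simp only [pvCondAdd, hf]
      split_ifs with hw
      · exact PySem.Set.nodup_add _ _ h
      · exact h

theorem pvKeep_eq_some {o : Option String} {v : String} :
    pvKeep o = some v ↔ o = some v ∧ v ≠ "" := by
  cases o with
  | none => simp [pvKeep]
  | some w =>
    simp only [pvKeep]
    split_ifs with hw
    · constructor
      · rintro h; cases h; exact ⟨rfl, hw⟩
      · rintro ⟨h, _⟩; cases h; rfl
    · constructor
      · rintro h; cases h
      · rintro ⟨h, hv⟩; cases h; exact absurd hv hw

-- in a ≤-sorted list every element is ≤ the last one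
theorem pvLe_getLast_of_pairwise (l : List String) (hl : l.Pairwise (· ≤ ·))
    {m : String} (hm : l.getLast? = some m) : ∀ a ∈ l, a ≤ m := by
  induction l with
  | nil => intro a ha; cases ha
  | cons x xs ih =>
    rcases List.pairwise_cons.mp hl with ⟨hx, hxs⟩
    intro a ha
    cases xs with
    | nil =>
      simp at hm ha
      subst hm; subst ha; exact le_refl _
    | cons y ys =>
      rw [List.getLast?_cons_cons] at hm
      rcases List.mem_cons.mp ha with rfl | ha'
      · exact le_trans (hx _ (List.mem_cons_self)) (ih hxs hm _ (List.mem_cons_self))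
      · exact ih hxs hm _ ha' 

-- invariant of B's adjacent-comparison dedup scan over a ≤-sorted stream
theorem pvDedupScan_invariant (l : List String) (hl : l.Pairwise (· ≤ ·)) :
    ∀ acc : List String, acc.Pairwise (· < ·) →
      (∀ a ∈ acc, ∀ v ∈ l, a ≤ v) →
      (l.foldl (fun out v => if out.getLast? = some v then out else out ++ [v]) acc).Pairwise (· < ·) ∧
      (∀ x, x ∈ l.foldl (fun out v => if out.getLast? = some v then out else out ++ [v]) acc ↔ x ∈ acc ∨ x ∈ l) := by
  induction l with
  | nil => intro acc hacc _; exact ⟨hacc, fun x => by simp⟩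
  | cons v vs ih =>
    intro acc hacc hle
    rcases List.pairwise_cons.mp hl with ⟨hv, hvs⟩
    simp only [List.foldl_cons]
    by_cases hlast : acc.getLast? = some v
    · rw [if_pos hlast]
      have hvacc : v ∈ acc := List.mem_of_getLast? hlast
      have ⟨hp, hmem⟩ := ih hvs acc hacc (fun a ha w hw => le_trans (hle a ha v List.mem_cons_self)
        (hv w hw))
      refine ⟨hp, fun x => ?_⟩
      rw [hmem]
      constructor
      · rintro (h | h)
        · exact Or.inl h
        · exact Or.inr (List.mem_cons_of_mem _ h)
      · rintro (h | h)
        · exact Or.inl h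
        · rcases List.mem_cons.mp h with rfl | h'
          · exact Or.inl hvacc
          · exact Or.inr h'
    · rw [if_neg hlast]
      have hlt : ∀ a ∈ acc, a < v := by
        intro a ha
        have hav : a ≤ v := hle a ha v List.mem_cons_self
        rcases lt_or_eq_of_le hav with h | rfl
        · exact h
        · -- a = v ∈ acc: then getLast ≥ a and getLast ≤ v, so getLast = v, contradiction
          cases hgl : acc.getLast? with
          | none => exact absurd (List.getLast?_eq_none_iff.mp hgl ▸ ha) (List.not_mem_nil)
          | some m =>
            have h1 : a ≤ m := pvLe_getLast_of_pairwise acc (hacc.imp le_of_lt) hgl a ha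
            have h2 : m ≤ a := hle m (List.mem_of_getLast? hgl) a List.mem_cons_self
            exact absurd (hgl.trans (congrArg some (le_antisymm h2 h1))) hlast
      have hacc' : (acc ++ [v]).Pairwise (· < ·) := by
        rw [List.pairwise_append]
        exact ⟨hacc, List.pairwise_singleton _ _, fun a ha b hb => (List.mem_singleton.mp hb) ▸ hlt a ha⟩
      have hle' : ∀ a ∈ acc ++ [v], ∀ w ∈ vs, a ≤ w := by
        intro a ha w hw
        rcases List.mem_append.mp ha with h | h
        · exact le_trans (hle a h v List.mem_cons_self) (hv w hw)
        · exact (List.mem_singleton.mp h) ▸ hv w hw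
      have ⟨hp, hmem⟩ := ih hvs (acc ++ [v]) hacc' hle'
      refine ⟨hp, fun x => ?_⟩
      rw [hmem]
      simp only [List.mem_append, List.mem_cons]
      tauto

-- each field: A's sorted set-fold equals B's sort-then-dedup-scan
theorem pvField_eq {α : Type} (f : α → Option String) (l : List α) :
    PySem.List.sorted (l.foldl (fun s x => pvCondAdd s (f x)) PySem.Set.empty) (fun x => x) false
      = pvUniqSorted (l.map f) := by
  unfold pvUniqSorted
  set srt := PySem.List.sorted ((l.map f).filterMap pvKeep) (fun x => x) false with hsrt
  have hsp : srt.Pairwise (· ≤ ·) := PySem.List.sorted_pairwise _ _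
  have ⟨hp, hmem⟩ := pvDedupScan_invariant srt hsp [] (by simp) (by simp)
  apply PySem.List.sorted_eq_of_perm_of_pairwise_lt
  · -- dedup result is a permutation of the set-fold
    rw [List.perm_ext_iff_of_nodup (hp.imp ne_of_lt) (pvNodup_foldCondAdd f l PySem.Set.empty (by simp [PySem.Set.empty]))]
    intro x
    rw [hmem x, pvMem_foldCondAdd]
    simp only [List.not_mem_nil, false_or, hsrt, PySem.List.mem_sorted, List.mem_filterMap,
      List.mem_map, pvKeep_eq_some, PySem.Set.empty]
    constructor
    · rintro ⟨o, ⟨y, hy, rfl⟩, hfy, hx⟩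
      exact ⟨y, hy, hfy, hx⟩
    · rintro ⟨y, hy, hfy, hx⟩
      exact ⟨f y, ⟨y, hy, rfl⟩, hfy, hx⟩
  · exact hp

-- B's per-entity area value coincides with A's _resolve_area
theorem pvArea_bridge (entity : List (String × String)) (devices : List (String × List (String × String))) :
    pvOrOpt (pvGet entity "area_id") (pvGet (pvDevice devices entity) "area_id")
      = resolve_area_py entity devices := by
  unfold pvOrOpt pvDevice resolve_area_py
  by_cases h : pvTruthy (pvGet entity "area_id")
  · simp [h]
  · simp only [if_neg h]
    cases hd : pvGet entity "device_id" with
    | none => rfl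
    | some d =>
      by_cases hdd : d ≠ ""
      · simp only [if_pos hdd]
        cases hdev : (PySem.Dict.mk devices).get? d with
        | none => rfl
        | some dev => simp
      · simp [if_neg hdd]; rfl
  
-- B's per-entity manufacturer value coincides with A's _resolve_manufacturer
theorem pvMfr_bridge (entity : List (String × String)) (devices : List (String × List (String × String))) :
    pvGet (pvDevice devices entity) "manufacturer" = resolve_manufacturer_py entity devices := by
  unfold pvDevice resolve_manufacturer_py
  cases hd : pvGet entity "device_id" with
  | none => rfl
  | some d =>
    by_cases hdd : d ≠ ""
    · simp only [if_pos hdd]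
      cases hdev : (PySem.Dict.mk devices).get? d with
      | none => rfl
      | some dev => simp
    · simp [if_neg hdd]; rfl

-- ===== VERDICT (by name: the statement is the Claim_ definition above) =====
theorem collect_categorical_values_py_spec : Claim_equal_collect_categorical_values_py := by
  intro entities devices _
  unfold Spec_collect_categorical_values_py
  unfold collect_categorical_values_py collect_categorical_values_py_alt
  have harea : (fun e => pvOrOpt (pvGet e "area_id") (pvGet (pvDevice devices e) "area_id"))
      = (fun e => resolve_area_py e devices) := funext (fun e => pvArea_bridge e devices)
  have hmfr : (fun e => pvGet (pvDevice devices e) "manufacturer")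
      = (fun e => resolve_manufacturer_py e devices) := funext (fun e => pvMfr_bridge e devices)
  rw [harea, hmfr, pvFold_split]
  refine Prod.ext ?_ (Prod.ext ?_ (Prod.ext ?_ (Prod.ext ?_ ?_)))
  · exact pvField_eq _ entities
  · exact pvField_eq _ entities
  · exact pvField_eq _ entities
  · exact pvField_eq (fun e => resolve_area_py e devices) entities
  · exact pvField_eq (fun e => resolve_manufacturer_py e devices) entities
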